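-- pv_equiv track=rewrite | github.com/Musfique-Ahmed/OOP-Theory | he.py | prime_printer
-- ===== SOURCE A (Python) =====
-- def is_prime(number):
--    if number <= 1:
--        return False
--    for i in range(2, number):
--        if number % i == 0:
--            return False
--    return True
--
-- def prime_printer(limit):
--    prev = 2
--    for i in range(3, limit):
--        if is_prime(i):
--            if i-prev == 2:
--                pair = (prev , i)
--                yield pair #genrator function
--            prev = i
-- ===== SOURCE B (Python) =====
-- def _is_prime(n):
--     if n < 2:
--         return False
--     if n % 2 == 0:
--         return n == 2
--     d = 3
--     while d * d <= n:
--         if n % d == 0: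
--             return False
--         d += 2
--     return True
--
-- def prime_printer(limit):
--     primes = [n for n in range(2, limit) if _is_prime(n)]
--     for p, q in zip(primes, primes[1:]):
--         if q - p == 2:
--             yield (p, q)
-- ===== Notes on version B (the rewrite author's own statement) =====
-- stated objective: faster
-- what changed: B tests primality by odd trial division only up to sqrt(n) instead of dividing by every number below n, and pairs consecutive primes via zip over the prime list instead of threading a running 'prev' state through the scan.
import Mathlib
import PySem

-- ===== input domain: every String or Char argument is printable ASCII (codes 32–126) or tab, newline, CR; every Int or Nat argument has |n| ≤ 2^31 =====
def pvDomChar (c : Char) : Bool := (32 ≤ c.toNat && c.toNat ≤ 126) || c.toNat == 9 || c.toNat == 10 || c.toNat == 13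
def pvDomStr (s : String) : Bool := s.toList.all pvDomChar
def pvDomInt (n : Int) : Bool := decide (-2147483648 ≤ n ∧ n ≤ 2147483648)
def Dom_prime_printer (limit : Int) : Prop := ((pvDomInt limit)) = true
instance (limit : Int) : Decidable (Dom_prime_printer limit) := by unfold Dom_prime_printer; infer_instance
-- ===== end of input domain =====

-- B replaces A's full trial division (all i in [2,n)) by odd trial division up to sqrt(n),
-- and pairs consecutive primes via zip over the collected prime list instead of a running 'prev'.
-- (A is a generator; equivalence is about the yielded sequence, returned here as a list.)

-- ===== PORT A =====
def isPrimeA (number : Int) : Bool :=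
  if number ≤ 1 then false
  else !((PySem.List.pyRange 2 number 1).any (fun i => PySem.Int.mod number i == 0))

def prime_printer (limit : Int) : List (List Int) :=
  ((PySem.List.pyRange 3 limit 1).foldl
    (fun (st : Int × List (List Int)) i =>
      if isPrimeA i then
        (i, if i - st.1 = 2 then st.2 ++ [[st.1, i]] else st.2)
      else st)
    ((2 : Int), ([] : List (List Int)))).2

-- ===== PORT B =====
-- termination helper for the while loop: d*d ≤ n forces d ≤ n
lemma pv_sq_le_imp_le {d n : Int} (h : d * d ≤ n) : d ≤ n := by
  rcases (by omega : d ≤ 0 ∨ 0 < d) with h0 | h0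
  · exact h0.trans (le_trans (mul_self_nonneg d) h)
  · nlinarith

def trialOdd (n d : Int) : Bool :=
  if h : d * d ≤ n then
    if PySem.Int.mod n d = 0 then false else trialOdd n (d + 2)
  else true
termination_by (n + 3 - d).toNat
decreasing_by
  have := pv_sq_le_imp_le h
  omega

def isPrimeB (n : Int) : Bool :=
  if n < 2 then false
  else if PySem.Int.mod n 2 = 0 then n == 2
  else trialOdd n 3

def prime_printer_alt (limit : Int) : List (List Int) :=
  let primes := (PySem.List.pyRange 2 limit 1).filter isPrimeB
  (primes.zip primes.tail).filterMap
    (fun pq => if pq.2 - pq.1 = 2 then some [pq.1, pq.2] else none)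

-- ===== PRECONDITION & SPEC =====
def Spec_prime_printer (limit : Int) (out : List (List Int)) : Prop := out = prime_printer_alt limit
instance (limit : Int) (out : List (List Int)) : Decidable (Spec_prime_printer limit out) := by unfold Spec_prime_printer; infer_instance

-- ===== CLAIM (what is proved, stated in full; the proofs are below) =====
def Claim_equal_prime_printer : Prop := ∀ (limit : Int), Dom_prime_printer limit → Spec_prime_printer limit (prime_printer limit)

-- ===== LEMMAS AND PROOFS =====

-- pairs of consecutive elements at gap 2, recursively (proof-side common form)
def pairs2 : List Int → List (List Int)
  | a :: b :: t => (if b - a = 2 then [[a, b]] else []) ++ pairs2 (b :: t)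
  | _ => []

-- "n has no divisor in [2, n)" — the common primality characterisation
def NoDiv (n : Int) : Prop := ∀ i : Int, 2 ≤ i → i < n → ¬ i ∣ n

lemma isPrimeA_iff (n : Int) : isPrimeA n = true ↔ 2 ≤ n ∧ NoDiv n := by
  unfold isPrimeA NoDiv
  split
  next hn =>
    constructor
    · intro h; cases h
    · rintro ⟨h2, _⟩; omega
  next hn =>
    simp only [Bool.not_eq_true', List.any_eq_false, PySem.List.mem_pyRange_one, beq_iff_eq,
      PySem.Int.mod_eq_zero_iff_dvd]
    constructor
    · intro h; exact ⟨by omega, fun i h2 hlt hd => (h i ⟨h2, hlt⟩) hd⟩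
    · rintro ⟨_, h⟩ i ⟨h2, hlt⟩ hd; exact h i h2 hlt hd

lemma trialOdd_iff (n : Int) (hodd : ¬ (2:Int) ∣ n) :
    ∀ (k : Nat) (d : Int), (n + 3 - d).toNat ≤ k → 3 ≤ d → (2:Int) ∣ (d + 1) →
      (trialOdd n d = true ↔ ∀ e : Int, d ≤ e → e * e ≤ n → ¬ e ∣ n) := by
  intro k
  induction k with
  | zero =>
    intro d hk h3 hd2
    have hgt : ¬ d * d ≤ n := fun h => by have := pv_sq_le_imp_le h; omega
    rw [trialOdd, dif_neg hgt]
    simp only [true_iff]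
    intro e he hee _
    have := pv_sq_le_imp_le hee
    omega
  | succ k ih =>
    intro d hk h3 hd2
    rw [trialOdd]
    by_cases hdd : d * d ≤ n
    · rw [dif_pos hdd]
      have hdn := pv_sq_le_imp_le hdd
      by_cases hmod : PySem.Int.mod n d = 0
      · rw [if_pos hmod]
        have hdvd : d ∣ n := (PySem.Int.mod_eq_zero_iff_dvd n d).mp hmod
        simp only [Bool.false_eq_true, false_iff]
        push Not
        exact ⟨d, le_refl d, hdd, hdvd⟩
      · rw [if_neg hmod]
        obtain ⟨c, hc⟩ := hd2
        rw [ih (d + 2) (by omega) (by omega) ⟨c + 1, by omega⟩]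
        constructor
        · intro h e he hee hde
          rcases (by omega : d + 2 ≤ e ∨ e = d ∨ e = d + 1) with h' | h' | h'
          · exact h e h' hee hde
          · exact hmod ((PySem.Int.mod_eq_zero_iff_dvd n d).mpr (h' ▸ hde))
          · exact hodd (dvd_trans ⟨c, hc⟩ (h' ▸ hde))
        · intro h e he hee hde; exact h e (by omega) hee hde
    · rw [dif_neg hdd]
      simp only [true_iff]
      intro e he hee hde
      have he2 := pv_sq_le_imp_le hee
      have : d * d ≤ e * e := by nlinarith
      omega

lemma isPrimeB_iff (n : Int) : isPrimeB n = true ↔ 2 ≤ n ∧ NoDiv n := by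
  unfold isPrimeB NoDiv
  by_cases h1 : n < 2
  · rw [if_pos h1]
    constructor
    · intro h; cases h
    · rintro ⟨h2, _⟩; omega
  · rw [if_neg h1]
    by_cases h2 : PySem.Int.mod n 2 = 0
    · rw [if_pos h2]
      have hd : (2:Int) ∣ n := (PySem.Int.mod_eq_zero_iff_dvd n 2).mp h2
      by_cases hn2 : n = 2
      · subst hn2
        simp only [beq_self_eq_true, true_iff]
        exact ⟨le_refl 2, fun i hi hlt _ => by omega⟩
      · simp only [beq_iff_eq, hn2, false_iff]
        rintro ⟨hn, hnd⟩
        exact hnd 2 (le_refl 2) (by omega) hd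
    · rw [if_neg h2]
      have hodd : ¬ (2:Int) ∣ n := fun hdv => h2 ((PySem.Int.mod_eq_zero_iff_dvd n 2).mpr hdv)
      have hne2 : n ≠ 2 := fun he => hodd (by rw [he])
      have h3 : 3 ≤ n := by omega
      rw [trialOdd_iff n hodd (n + 3 - 3).toNat 3 (le_refl _) (by omega) ⟨2, by ring⟩]
      constructor
      · intro h
        refine ⟨by omega, fun i hi hlt hd => ?_⟩
        have hi2 : i ≠ 2 := fun he => hodd (he ▸ hd)
        have hi3 : 3 ≤ i := by omega
        obtain ⟨j, hj⟩ := hd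
        have hjpos : 0 < j := by nlinarith
        have hj1 : j ≠ 1 := fun he => by rw [he, mul_one] at hj; omega
        have hjodd : j ≠ 2 := fun he => hodd ⟨i, by rw [hj, he]; ring⟩
        have hj3 : 3 ≤ j := by omega
        rcases le_total i j with hij | hij
        · exact h i hi3 (by nlinarith) ⟨j, hj⟩
        · exact h j hj3 (by nlinarith) ⟨i, by rw [hj]; ring⟩
      · rintro ⟨_, h⟩ e he hee hde
        have he2 := pv_sq_le_imp_le hee
        have hen : e < n := by
          rcases he2.lt_or_eq with h' | h'
          · exact h'
          · subst h'; nlinarith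
        exact h e (by omega) hen hde

lemma primeAB : isPrimeA = isPrimeB := by
  funext n
  have h := (isPrimeA_iff n).trans (isPrimeB_iff n).symm
  rcases Bool.eq_false_or_eq_true (isPrimeA n) with ha | ha <;>
    rcases Bool.eq_false_or_eq_true (isPrimeB n) with hb | hb <;>
    simp_all

lemma loopA (xs : List Int) (prev : Int) (acc : List (List Int)) :
    ((xs.foldl
      (fun (st : Int × List (List Int)) i =>
        if isPrimeA i then
          (i, if i - st.1 = 2 then st.2 ++ [[st.1, i]] else st.2)
        else st)
      (prev, acc)).2) = acc ++ pairs2 (prev :: xs.filter isPrimeA) := by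
  induction xs generalizing prev acc with
  | nil => simp [pairs2]
  | cons x xs ih =>
    simp only [List.foldl_cons, List.filter_cons]
    by_cases hx : isPrimeA x
    · simp only [hx, if_true]
      rw [ih]
      by_cases hgap : x - prev = 2 <;> simp [hgap, pairs2]
    · simp [hx, ih]

lemma pairsZip (l : List Int) :
    (l.zip l.tail).filterMap
      (fun pq => if pq.2 - pq.1 = 2 then some [pq.1, pq.2] else none) = pairs2 l := by
  match l with
  | [] => rfl
  | [a] => rfl
  | a :: b :: t =>
    have ih := pairsZip (b :: t)
    simp only [List.tail_cons, List.zip_cons_cons, List.filterMap_cons] at *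
    have h2 : pairs2 (a :: b :: t) = (if b - a = 2 then [[a, b]] else []) ++ pairs2 (b :: t) := rfl
    rw [h2, ← ih]
    rcases eq_or_ne (b - a) 2 with hg | hg <;> simp [hg]

-- ===== VERDICT (by name: the statement is the Claim_ definition above) =====
theorem prime_printer_spec : Claim_equal_prime_printer := by
  intro limit _
  unfold Spec_prime_printer prime_printer prime_printer_alt
  rw [loopA, pairsZip, primeAB, List.nil_append]
  rcases (by omega : limit < 3 ∨ 2 < limit) with h | h
  · rw [PySem.List.pyRange_one_eq_nil (by omega : limit ≤ 2),
        PySem.List.pyRange_one_eq_nil (by omega : limit ≤ 3)]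
    rfl
  · rw [PySem.List.pyRange_one_cons (by omega : (2:Int) < limit)]
    simp only [List.filter_cons]
    norm_num [show isPrimeB 2 = true from by decide]
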